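-- pv_equiv track=rewrite | github.com/coder-8bit/RTOS | Os_Test/test_os.py | require_order
-- ===== SOURCE A (Python) =====
-- from typing import List, Sequence, Tuple
--
-- def find_message_index(texts: Sequence[str], message: str, start: int = 0) -> int:
--     """Tìm dòng thông báo trong chuỗi Log."""
--     for idx in range(start, len(texts)):
--         if texts[idx] == message:
--             return idx
--     raise AssertionError(f"Khong tim thay message: {message}")
--
-- def require_order(events: Sequence[Tuple[int, str]], messages: Sequence[str]) -> List[int]:
--     """Xác nhận rằng một chuỗi thông báo nhất định bắt buộc tuân thủ đúng thứ tự in."""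
--     texts = [text for _, text in events]
--     indices: List[int] = []
--     start = 0
--     for message in messages:
--         idx = find_message_index(texts, message, start)
--         indices.append(idx)
--         start = idx + 1
--     return indices
-- ===== SOURCE B (Python) =====
-- def require_order(events, messages):
--     indices = []
--     j = 0
--     for i, (_, text) in enumerate(events):
--         if j == len(messages):
--             break
--         if text == messages[j]:
--             indices.append(i)
--             j += 1
--     if j < len(messages):
--         raise AssertionError(f"Khong tim thay message: {messages[j]}")
--     return indices
-- ===== Notes on version B (the rewrite author's own statement) =====
-- stated objective: alternative
-- what changed: Inverts the loop nesting: instead of one forward scan over the event texts per message (restarting from the previous match), B makes a single pass over the events with a pointer into messages that advances on each match.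
import Mathlib
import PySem

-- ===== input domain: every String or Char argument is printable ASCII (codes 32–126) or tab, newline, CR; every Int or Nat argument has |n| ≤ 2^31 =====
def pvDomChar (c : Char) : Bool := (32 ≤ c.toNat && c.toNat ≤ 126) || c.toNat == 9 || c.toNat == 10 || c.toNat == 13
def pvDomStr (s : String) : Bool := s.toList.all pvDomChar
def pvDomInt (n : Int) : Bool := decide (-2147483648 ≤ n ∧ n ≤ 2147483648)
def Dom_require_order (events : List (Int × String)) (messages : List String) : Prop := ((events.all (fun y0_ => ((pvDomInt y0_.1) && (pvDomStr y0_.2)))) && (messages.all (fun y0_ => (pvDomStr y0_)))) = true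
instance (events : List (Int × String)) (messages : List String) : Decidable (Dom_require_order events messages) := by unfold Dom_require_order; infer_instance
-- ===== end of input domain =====

-- B inverts the loop nesting: a single pass over events with a pointer into messages,
-- instead of a forward scan over the event texts per message (alternative decomposition).


-- ===== PORT A =====
-- 'for idx in range(start, len(texts)): if texts[idx] == message: return idx' — early return over the range list
def pvFindLoop (texts : List String) (message : String) : List Int → Option Int
  | [] => none   -- falls off the loop: A raises AssertionError (excluded by Pre_)
  | idx :: rest =>
    if PySem.List.pyGet? texts idx = some message then some idx
    else pvFindLoop texts message rest

def find_message_index (texts : List String) (message : String) (start : Int) : Option Int :=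
  pvFindLoop texts message (PySem.List.pyRange start (texts.length : Int) 1)

-- 'for message in messages: idx = find_message_index(...); indices.append(idx); start = idx + 1'
def pvROLoop (texts : List String) : List String → Int → List Int
  | [], _ => []
  | message :: rest, start =>
    match find_message_index texts message start with
    | some idx => idx :: pvROLoop texts rest (idx + 1)
    | none => []   -- A raises AssertionError here (excluded by Pre_)

def require_order (events : List (Int × String)) (messages : List String) : List Int :=
  let texts := events.map (fun p => p.2)
  pvROLoop texts messages 0

-- ===== PORT B =====
-- single pass over events with counter i; pointer into messages = the remaining-messages list
def pvAltLoop : List (Int × String) → Int → List String → List Int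
  | _, _, [] => []                -- j == len(messages): break
  | [], _, _ :: _ => []           -- events exhausted with messages left: B raises (excluded by Pre_)
  | (_, text) :: rest, i, m :: ms =>
    if text = m then i :: pvAltLoop rest (i + 1) ms
    else pvAltLoop rest (i + 1) (m :: ms)

def require_order_alt (events : List (Int × String)) (messages : List String) : List Int :=
  pvAltLoop events 0 messages

-- ===== PRECONDITION & SPEC =====
-- A raises AssertionError exactly when messages cannot be matched left-to-right as a
-- subsequence of the event texts; Pre_ admits exactly the inputs where A returns.
def Pre_require_order (events : List (Int × String)) (messages : List String) : Prop :=
  messages.isSublist (events.map (fun p => p.2)) = true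
instance (events : List (Int × String)) (messages : List String) : Decidable (Pre_require_order events messages) := by unfold Pre_require_order; infer_instance

def pvWitness_require_order : (List (Int × String)) × List String :=
  ([(1, "a"), (2, "b"), (3, "a")], ["a", "b"])

def Spec_require_order (events : List (Int × String)) (messages : List String) (out : List Int) : Prop := out = require_order_alt events messages
instance (events : List (Int × String)) (messages : List String) (out : List Int) : Decidable (Spec_require_order events messages out) := by unfold Spec_require_order; infer_instance

-- ===== CLAIM (what is proved, stated in full; the proofs are below) =====
def Claim_equal_require_order : Prop := ∀ (events : List (Int × String)) (messages : List String), Dom_require_order events messages → Pre_require_order events messages → Spec_require_order events messages (require_order events messages)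

-- ===== LEMMAS AND PROOFS =====

-- B's scan, phrased over the text list only
def pvAltT : List String → Int → List String → List Int
  | _, _, [] => []
  | [], _, _ :: _ => []
  | t :: rest, i, m :: ms =>
    if t = m then i :: pvAltT rest (i + 1) ms
    else pvAltT rest (i + 1) (m :: ms)

lemma pvAltLoop_eq_altT (es : List (Int × String)) :
    ∀ (i : Int) (ms : List String), pvAltLoop es i ms = pvAltT (es.map (fun p => p.2)) i ms := by
  induction es with
  | nil => intro i ms; cases ms <;> simp [pvAltLoop, pvAltT]
  | cons e rest ih =>
    intro i ms
    cases ms with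
    | nil => simp [pvAltLoop, pvAltT]
    | cons m ms' =>
      obtain ⟨k, t⟩ := e
      simp only [pvAltLoop, pvAltT, List.map_cons]
      split_ifs with h <;> simp [ih]

-- A's inner forward scan, phrased structurally on the dropped suffix
def pvFindT : List String → Int → String → Option Int
  | [], _, _ => none
  | t :: rest, i, m => if t = m then some i else pvFindT rest (i + 1) m

lemma find_eq_findT (texts : List String) (m : String) :
    ∀ (l : List String) (n : Nat), texts.drop n = l →
      find_message_index texts m (n : Int) = pvFindT l (n : Int) m := by
  intro l
  induction l with
  | nil =>
    intro n hd
    have hlen : texts.length ≤ n := List.drop_eq_nil_iff.mp hd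
    unfold find_message_index
    rw [PySem.List.pyRange_one_eq_nil (by exact_mod_cast hlen)]
    simp [pvFindLoop, pvFindT]
  | cons t rest ih =>
    intro n hd
    have hne : texts.drop n ≠ [] := by rw [hd]; simp
    have hlt : n < texts.length := by
      by_contra h
      exact hne (List.drop_eq_nil_iff.mpr (by omega))
    have hget : texts[n]? = some t := by
      rw [← List.head?_drop, hd]; rfl
    have hdrop : texts.drop (n + 1) = rest := by
      rw [← List.tail_drop, hd]; rfl
    unfold find_message_index
    rw [PySem.List.pyRange_one_cons (by exact_mod_cast hlt)]
    simp only [pvFindLoop, pvFindT, PySem.List.pyGet?_natCast, hget, Option.some.injEq]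
    split_ifs with h
    · rfl
    · have h2 := ih (n + 1) hdrop
      unfold find_message_index at h2
      rw [show ((n : Int) + 1) = ((n + 1 : Nat) : Int) by push_cast; ring]
      exact h2

-- main invariant: A's per-message scans from offset n equal B's scan of the dropped suffix
lemma pvROLoop_eq_altT (texts : List String) :
    ∀ (l : List String) (n : Nat), texts.drop n = l →
      ∀ (ms : List String), pvROLoop texts ms (n : Int) = pvAltT l (n : Int) ms := by
  intro l
  induction l with
  | nil =>
    intro n hd ms
    cases ms with
    | nil => simp [pvROLoop, pvAltT]
    | cons m ms' =>
      simp only [pvROLoop, pvAltT]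
      rw [find_eq_findT texts m [] n hd]
      rfl
  | cons t rest ih =>
    intro n hd ms
    cases ms with
    | nil => simp [pvROLoop, pvAltT]
    | cons m ms' =>
      have hdrop : texts.drop (n + 1) = rest := by
        rw [← List.tail_drop, hd]; rfl
      simp only [pvROLoop, pvAltT]
      rw [find_eq_findT texts m (t :: rest) n hd]
      simp only [pvFindT]
      split_ifs with h
      · simp only
        rw [show ((n : Int) + 1) = ((n + 1 : Nat) : Int) by push_cast; ring]
        rw [ih (n + 1) hdrop ms']
      · rw [show ((n : Int) + 1) = ((n + 1 : Nat) : Int) by push_cast; ring]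
        have := ih (n + 1) hdrop (m :: ms')
        simp only [pvROLoop] at this
        rw [find_eq_findT texts m rest (n + 1) hdrop] at this
        exact this

-- ===== VERDICT (by name: the statement is the Claim_ definition above) =====
theorem require_order_spec : Claim_equal_require_order := by
  intro events messages _ _
  unfold Spec_require_order require_order require_order_alt
  rw [pvAltLoop_eq_altT]
  exact pvROLoop_eq_altT (events.map (fun p => p.2)) (events.map (fun p => p.2)) 0 rfl messages
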